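-- pv_equiv track=rewrite | github.com/LZY-Ricardo/free-video-download | backend/app/services/video_ai_service.py | _pick_subtitle_entry
-- ===== SOURCE A (Python) =====
-- from typing import Any, Callable, Dict, Iterator, List, Optional, Tuple
--
-- def _pick_subtitle_entry(entries: Any) -> Optional[str]:
--     if not entries:
--         return None
--     if not isinstance(entries, list):
--         return None
--
--     preferred_ext_order = ["vtt", "srt", "ttml", "srv3", "srv2", "srv1"]
--     sorted_entries = sorted(
--         entries,
--         key=lambda item: preferred_ext_order.index(item.get("ext"))
--         if item.get("ext") in preferred_ext_order
--         else len(preferred_ext_order),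
--     )
--     for entry in sorted_entries:
--         subtitle_url = entry.get("url")
--         ext = (entry.get("ext") or "").lower()
--         # bilibili danmaku 不是语音字幕，不作为转录来源
--         if ext == "xml":
--             continue
--         if subtitle_url and "comment.bilibili.com" not in subtitle_url:
--             return subtitle_url
--     return None
-- ===== SOURCE B (Python) =====
-- from typing import Any, Optional
--
-- def _pick_subtitle_entry(entries: Any) -> Optional[str]:
--     if not entries:
--         return None
--     if not isinstance(entries, list):
--         return None
--
--     preferred_ext_order = ["vtt", "srt", "ttml", "srv3", "srv2", "srv1"]
--     best = None  # (key, url) of the best valid entry seen so far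
--     for item in entries:
--         ext_raw = item.get("ext")
--         key = (preferred_ext_order.index(ext_raw)
--                if ext_raw in preferred_ext_order
--                else len(preferred_ext_order))
--         ext = (ext_raw or "").lower()
--         url = item.get("url")
--         if ext == "xml":
--             continue
--         if not url or "comment.bilibili.com" in url:
--             continue
--         if best is None or key < best[0]:
--             best = (key, url)
--     return None if best is None else best[1]
-- ===== Notes on version B (the rewrite author's own statement) =====
-- stated objective: simpler
-- what changed: Instead of sorting all entries by extension priority and scanning the sorted list for the first acceptable URL, B makes a single pass tracking the best (lowest-priority-key, strictly-less wins, so earliest entry wins ties) valid candidate, avoiding the sort entirely.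
import Mathlib
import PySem

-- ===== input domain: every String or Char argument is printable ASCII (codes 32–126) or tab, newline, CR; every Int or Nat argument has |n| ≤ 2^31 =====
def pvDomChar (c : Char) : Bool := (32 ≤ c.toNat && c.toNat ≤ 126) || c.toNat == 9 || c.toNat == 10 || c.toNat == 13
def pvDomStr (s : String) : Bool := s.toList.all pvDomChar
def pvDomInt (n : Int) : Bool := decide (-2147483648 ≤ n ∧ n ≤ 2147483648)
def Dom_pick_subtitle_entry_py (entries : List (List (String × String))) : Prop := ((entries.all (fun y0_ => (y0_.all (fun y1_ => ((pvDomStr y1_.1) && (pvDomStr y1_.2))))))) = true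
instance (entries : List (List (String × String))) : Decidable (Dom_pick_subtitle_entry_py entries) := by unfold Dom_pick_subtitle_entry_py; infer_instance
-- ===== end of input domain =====

-- B replaces A's sort-then-scan by a single pass tracking the best (min-priority-key,
-- earliest on ties) valid subtitle URL; objective: simpler (no sort).


-- ===== PORT A =====
-- dict.get(k): first match in the association list, None if absent
def pvGet : List (String × String) → String → Option String
  | [], _ => none
  | (k, v) :: rest, key => if k = key then some v else pvGet rest key

def pvExtOrder : List String := ["vtt", "srt", "ttml", "srv3", "srv2", "srv1"]

-- the sort key of A (and the preference key of B): index in pvExtOrder, else its length;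
-- 'item.get("ext") in preferred_ext_order' is False for None
def pvKey (item : List (String × String)) : Nat :=
  match pvGet item "ext" with
  | some s => if pvExtOrder.contains s then (PySem.List.index? pvExtOrder s).getD 6 else 6
  | none => 6

-- the 'for entry in sorted_entries' loop of A
def pvLoopA : List (List (String × String)) → Option String
  | [] => none
  | entry :: rest =>
    let url := pvGet entry "url"
    let ext := PySem.Str.lower ((pvGet entry "ext").getD "")   -- (… or "").lower(): only "" is falsy
    if ext == "xml" then pvLoopA rest
    else
      match url with
      | some u =>
        if u ≠ "" && !(PySem.Str.isIn "comment.bilibili.com" u) then some u else pvLoopA rest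
      | none => pvLoopA rest

def pick_subtitle_entry_py (entries : List (List (String × String))) : Option String :=
  if entries = [] then none
  else pvLoopA (PySem.List.sorted entries pvKey)

-- ===== PORT B =====
-- one step of B's single pass: skip invalid items, keep the strictly better candidate
def pvStepB (st : Option (Nat × String)) (item : List (String × String)) : Option (Nat × String) :=
  let key := pvKey item
  let ext := PySem.Str.lower ((pvGet item "ext").getD "")
  let url := pvGet item "url"
  if ext == "xml" then st
  else
    match url with
    | none => st
    | some u =>
      if u = "" || PySem.Str.isIn "comment.bilibili.com" u then st
      else
        match st with
        | none => some (key, u)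
        | some b => if key < b.1 then some (key, u) else st

def pick_subtitle_entry_py_alt (entries : List (List (String × String))) : Option String :=
  if entries = [] then none
  else (entries.foldl pvStepB none).map (·.2)

-- ===== PRECONDITION & SPEC =====
def Spec_pick_subtitle_entry_py (entries : List (List (String × String))) (out : Option String) : Prop := out = pick_subtitle_entry_py_alt entries
instance (entries : List (List (String × String))) (out : Option String) : Decidable (Spec_pick_subtitle_entry_py entries out) := by unfold Spec_pick_subtitle_entry_py; infer_instance

-- ===== CLAIM (what is proved, stated in full; the proofs are below) =====
def Claim_equal_pick_subtitle_entry_py : Prop := ∀ (entries : List (List (String × String))), Dom_pick_subtitle_entry_py entries → Spec_pick_subtitle_entry_py entries (pick_subtitle_entry_py entries)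

-- ===== LEMMAS AND PROOFS =====

-- an entry is accepted by A's scan (and by B's pass)
def pvValid (e : List (String × String)) : Bool :=
  !(PySem.Str.lower ((pvGet e "ext").getD "") == "xml") &&
  (match pvGet e "url" with
   | some u => !(u == "") && !(PySem.Str.isIn "comment.bilibili.com" u)
   | none => false)

def pvUrl (e : List (String × String)) : String := (pvGet e "url").getD ""

-- first valid entry of a list
def pvF (l : List (List (String × String))) : Option (List (String × String)) :=
  (l.filter pvValid).head?

def pvBmap (o : Option (List (String × String))) : Option (Nat × String) :=
  o.map (fun e => (pvKey e, pvUrl e))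

theorem pvF_cons (e : List (String × String)) (rest : List (List (String × String))) :
    pvF (e :: rest) = if pvValid e then some e else pvF rest := by
  simp only [pvF, List.filter]
  cases hv : pvValid e <;> simp

theorem pvLoopA_cons (e : List (String × String)) (rest : List (List (String × String))) :
    pvLoopA (e :: rest) = if pvValid e then some (pvUrl e) else pvLoopA rest := by
  simp only [pvLoopA, pvValid, pvUrl]
  cases hx : (PySem.Str.lower ((pvGet e "ext").getD "") == "xml")
  · cases hu : pvGet e "url" with
    | none => simp
    | some u =>
      by_cases hne : u = ""
      · simp [hne]
      · cases hin : PySem.Str.isIn "comment.bilibili.com" u <;>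
          · simp only []
            simp only [hin]
            simp [hne]
  · simp

theorem pvLoopA_eq_F : ∀ l, pvLoopA l = (pvF l).map pvUrl := by
  intro l
  induction l with
  | nil => rfl
  | cons e rest ih =>
    rw [pvLoopA_cons, pvF_cons]
    cases hv : pvValid e <;> simp [ih]

-- B's step in terms of pvValid/pvKey/pvUrl
theorem pvStepB_char (st : Option (Nat × String)) (x : List (String × String)) :
    pvStepB st x =
      if pvValid x then
        (match st with
         | none => some (pvKey x, pvUrl x)
         | some b => if pvKey x < b.1 then some (pvKey x, pvUrl x) else st)
      else st := by
  simp only [pvStepB, pvValid, pvUrl]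
  cases hx : (PySem.Str.lower ((pvGet x "ext").getD "") == "xml")
  · cases hu : pvGet x "url" with
    | none => simp
    | some u =>
      by_cases hne : u = ""
      · simp [hne]
      · cases hin : PySem.Str.isIn "comment.bilibili.com" u <;>
          · simp only []
            simp only [hin]
            simp [hne]
  · simp

-- a first valid entry is a member of the list
theorem pvF_mem {l : List (List (String × String))} {e : List (String × String)}
    (h : pvF l = some e) : e ∈ l := by
  rw [pvF] at h
  cases hl : l.filter pvValid with
  | nil => rw [hl] at h; simp at h
  | cons a t =>
    rw [hl] at h
    simp only [List.head?_cons, Option.some.injEq] at h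
    subst h
    have ha : a ∈ l.filter pvValid := by rw [hl]; exact List.mem_cons_self
    exact (List.mem_filter.mp ha).1

-- the key step: inserting x into a key-sorted list updates the first-valid entry
-- exactly as B's step updates its state
theorem pvStep_insert (l : List (List (String × String)))
    (hs : l.Pairwise (fun a b => pvKey a ≤ pvKey b)) (x : List (String × String)) :
    pvBmap (pvF (PySem.List.insertBy (fun a b => decide (pvKey a < pvKey b)) x l)) =
      pvStepB (pvBmap (pvF l)) x := by
  induction l with
  | nil =>
    show pvBmap (pvF [x]) = _
    rw [pvStepB_char, pvF_cons]
    by_cases hv : pvValid x <;> simp [hv, pvF, pvBmap]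
  | cons y ys ih =>
    have hy : ∀ b ∈ ys, pvKey y ≤ pvKey b := (List.pairwise_cons.mp hs).1
    have hys : ys.Pairwise (fun a b => pvKey a ≤ pvKey b) := (List.pairwise_cons.mp hs).2
    by_cases hlt : pvKey x < pvKey y
    · -- x goes in front of y
      have hins : PySem.List.insertBy (fun a b => decide (pvKey a < pvKey b)) x (y :: ys)
          = x :: y :: ys := by simp [PySem.List.insertBy, hlt]
      rw [hins, pvF_cons, pvStepB_char]
      by_cases hv : pvValid x
      · -- x is the new first valid
        simp only [hv, if_pos]
        cases hF : pvF (y :: ys) with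
        | none => simp [pvBmap]
        | some e =>
          have hke : pvKey y ≤ pvKey e := by
            rcases List.mem_cons.mp (pvF_mem hF) with h | h
            · subst h; exact le_refl _
            · exact hy e h
          have hxe : pvKey x < pvKey e := lt_of_lt_of_le hlt hke
          simp [pvBmap, hxe]
      · simp [hv]
    · -- x goes after y
      have hins : PySem.List.insertBy (fun a b => decide (pvKey a < pvKey b)) x (y :: ys)
          = y :: PySem.List.insertBy (fun a b => decide (pvKey a < pvKey b)) x ys := by
        simp [PySem.List.insertBy, hlt]
      rw [hins, pvF_cons, pvF_cons]
      by_cases hv : pvValid y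
      · -- y stays the first valid on both sides
        rw [pvStepB_char]
        by_cases hvx : pvValid x
        · simp [hv, hvx, pvBmap, Nat.not_lt.mpr (Nat.not_lt.mp hlt)]
        · simp [hv, hvx, pvBmap]
      · simp only [hv, Bool.false_eq_true, if_false]
        exact ih hys

theorem pvMain : ∀ entries : List (List (String × String)),
    pvBmap (pvF (PySem.List.sorted entries pvKey)) = entries.foldl pvStepB none := by
  intro entries
  induction entries using List.reverseRecOn with
  | nil => rfl
  | append_singleton p x ih =>
    have hsort : PySem.List.sorted (p ++ [x]) pvKey
        = PySem.List.insertBy (fun a b => decide (pvKey a < pvKey b)) x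
            (PySem.List.sorted p pvKey) := by
      rw [PySem.List.sorted_eq_foldl_insertBy, PySem.List.sorted_eq_foldl_insertBy,
        List.foldl_append]
      rfl
    rw [hsort, List.foldl_append]
    simp only [List.foldl]
    rw [pvStep_insert _ (PySem.List.sorted_pairwise p pvKey), ih]

-- ===== VERDICT (by name: the statement is the Claim_ definition above) =====
theorem pick_subtitle_entry_py_spec : Claim_equal_pick_subtitle_entry_py := by
  intro entries _
  unfold Spec_pick_subtitle_entry_py
  unfold pick_subtitle_entry_py pick_subtitle_entry_py_alt
  by_cases h : entries = []
  · simp [h]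
  · simp only [h, if_false]
    rw [pvLoopA_eq_F, ← pvMain]
    cases pvF (PySem.List.sorted entries pvKey) <;> simp [pvBmap, pvUrl]
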